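-- pv_equiv track=rewrite | github.com/lamperi/aoc | 2017/09/solve.py | func
-- ===== SOURCE A (Python) =====
-- def func(inp):
--     score = 0
--     cancelled = 0
--     escape = False
--     garbage = False
--     level = 0
--     for c in inp:
--         if escape:
--             escape = False
--             continue
--         if garbage and c == "!":
--             escape = True
--         elif not garbage and c == "<":
--             garbage = True
--         elif garbage and c == ">":
--             garbage = False
--         elif not garbage and c == "{":
--             level += 1
--         elif not garbage and c == "}":
--             score += level
--             level -= 1
--         elif garbage:
--             cancelled += 1
--     return cancelled
-- ===== SOURCE B (Python) =====
-- def func(inp):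
--     # Two-level cursor scan: skip to each '<', then walk the garbage block
--     # counting characters, jumping over '!X' escape pairs.
--     i, n, total = 0, len(inp), 0
--     while i < n:
--         if inp[i] == '<':
--             i += 1
--             while i < n:
--                 c = inp[i]
--                 if c == '!':
--                     i += 2
--                 elif c == '>':
--                     i += 1
--                     break
--                 else:
--                     total += 1
--                     i += 1
--         else:
--             i += 1
--     return total
-- ===== Notes on version B (the rewrite author's own statement) =====
-- stated objective: simpler
-- what changed: Replaces A's five-variable flag/state machine with a two-level cursor scan: an outer loop skips to each garbage opener and an inner loop counts the block's characters while jumping over escape pairs; the dead group-score and nesting-level bookkeeping disappears.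
import Mathlib
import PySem

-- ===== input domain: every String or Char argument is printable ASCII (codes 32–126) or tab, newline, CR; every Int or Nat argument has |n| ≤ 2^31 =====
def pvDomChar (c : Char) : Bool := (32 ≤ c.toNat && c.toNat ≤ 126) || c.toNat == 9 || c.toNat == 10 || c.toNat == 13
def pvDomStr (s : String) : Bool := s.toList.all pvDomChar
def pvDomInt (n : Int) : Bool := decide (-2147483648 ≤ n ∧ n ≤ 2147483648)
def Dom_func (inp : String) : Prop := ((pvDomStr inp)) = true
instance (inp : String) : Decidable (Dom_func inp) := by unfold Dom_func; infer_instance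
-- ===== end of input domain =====

-- B simplifies A: only garbage counting matters for the return value, so B drops the
-- score/level/escape/garbage flag machine and uses a two-level cursor scan instead.

-- ===== PORT A =====
-- state = (score, cancelled, escape, garbage, level), exactly A's variables
def stepA (st : Int × Int × Bool × Bool × Int) (c : Char) : Int × Int × Bool × Bool × Int :=
  let (score, cancelled, escape, garbage, level) := st
  if escape then (score, cancelled, false, garbage, level)
  else if garbage && c == '!' then (score, cancelled, true, garbage, level)
  else if !garbage && c == '<' then (score, cancelled, escape, true, level)
  else if garbage && c == '>' then (score, cancelled, escape, false, level)
  else if !garbage && c == '{' then (score, cancelled, escape, garbage, level + 1)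
  else if !garbage && c == '}' then (score + level, cancelled, escape, garbage, level - 1)
  else if garbage then (score, cancelled + 1, escape, garbage, level)
  else (score, cancelled, escape, garbage, level)

def func (inp : String) : Int :=
  (inp.toList.foldl stepA (0, 0, false, false, 0)).2.1

-- ===== PORT B =====
mutual
-- outer loop: skip characters until a '<' opens a garbage block
def bOuter : List Char → Int
  | [] => 0
  | c :: rest => if c == '<' then bInner rest else bOuter rest
termination_by l => l.length
-- inner loop: count garbage chars, jump over escape pairs, close returns to outer
def bInner : List Char → Int
  | [] => 0
  | '!' :: [] => 0
  | '!' :: _ :: rest => bInner rest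
  | c :: rest => if c == '>' then bOuter rest else 1 + bInner rest
termination_by l => l.length
end

def func_alt (inp : String) : Int := bOuter inp.toList

-- ===== PRECONDITION & SPEC =====
def Spec_func (inp : String) (out : Int) : Prop := out = func_alt inp
instance (inp : String) (out : Int) : Decidable (Spec_func inp out) := by unfold Spec_func; infer_instance

-- ===== CLAIM (what is proved, stated in full; the proofs are below) =====
def Claim_equal_func : Prop := ∀ (inp : String), Dom_func inp → Spec_func inp (func inp)

-- ===== LEMMAS AND PROOFS =====

theorem key : ∀ n (l : List Char), l.length ≤ n →
    (∀ (s cl lv : Int), (l.foldl stepA (s, cl, false, false, lv)).2.1 = cl + bOuter l)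
    ∧ (∀ (s cl lv : Int), (l.foldl stepA (s, cl, false, true, lv)).2.1 = cl + bInner l) := by
  intro n
  induction n with
  | zero =>
    intro l h
    have hl : l = [] := List.eq_nil_of_length_eq_zero (Nat.le_zero.mp h)
    subst hl
    exact ⟨fun s cl lv => by simp [bOuter], fun s cl lv => by simp [bInner]⟩
  | succ n ih =>
    intro l h
    match l with
    | [] => simp [bOuter, bInner]
    | c :: rest =>
      have hr : rest.length ≤ n := by simpa using h
      constructor
      · intro s cl lv
        by_cases h1 : c = '<'
        · simp [List.foldl, stepA, h1, bOuter, (ih rest hr).2]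
        · by_cases h2 : c = '{'
          · simp [List.foldl, stepA, h1, h2, bOuter, (ih rest hr).1]
          · by_cases h3 : c = '}'
            · simp [List.foldl, stepA, h1, h2, h3, bOuter, (ih rest hr).1]
            · simp [List.foldl, stepA, h1, h2, h3, bOuter, (ih rest hr).1]
      · intro s cl lv
        by_cases h1 : c = '!'
        · subst h1
          match rest, hr with
          | [], _ => simp [List.foldl, stepA, bInner]
          | x :: rest', hr =>
            have hr' : rest'.length ≤ n := by
              simp at hr; omega
            simp [List.foldl, stepA, bInner, (ih rest' hr').2]
        · by_cases h2 : c = '>'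
          · subst h2
            simp [List.foldl, stepA, bInner, (ih rest hr).1]
          · have : bInner (c :: rest) = 1 + bInner rest := by
              rw [bInner.eq_def]
              split
              · simp_all
              · simp_all
              · simp_all
              · rename_i heq
                obtain ⟨rfl, rfl⟩ := List.cons.injEq _ _ _ _ |>.mp heq
                simp [h2]
            rw [this]
            simp [List.foldl, stepA, h1, h2, (ih rest hr).2]
            omega

-- ===== VERDICT (by name: the statement is the Claim_ definition above) =====
theorem func_spec : Claim_equal_func := by
  intro inp _
  unfold Spec_func func func_alt
  have := (key inp.toList.length inp.toList le_rfl).1 0 0 0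
  simpa using this
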